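-- pv_equiv track=rewrite | github.com/tom-draper/pldashboard | updater/src/data/dataframes/form.py | _last_n_played_matchdays
-- ===== SOURCE A (Python) =====
-- def _last_n_played_matchdays(d: dict, team: str, current_season: int, N: int):
--     played_matchdays = []
--     for matchday in range(38, 0, -1):
--         if (current_season, matchday, "team") in d[team]:
--             played_matchdays.append(matchday)
--         if len(played_matchdays) >= N:
--             break
--
--     played_matchdays.reverse()
--     return played_matchdays
-- ===== SOURCE B (Python) =====
-- def _last_n_played_matchdays(d: dict, team: str, current_season: int, N: int):
--     row = d[team]
--     played = [m for m in range(1, 39) if (current_season, m, "team") in row]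
--     return played[-N:] if N > 0 else []
-- ===== Notes on version B (the rewrite author's own statement) =====
-- stated objective: simpler
-- what changed: B builds the ascending list of played matchdays in one forward comprehension and returns its last N via a tail slice, instead of A's descending loop with early break, append accumulator and final reverse.
-- outside the precondition, e.g. on _last_n_played_matchdays({'a': {(2024, 38, 'team'): 1}}, 'a', 2024, 0): A returns [38], B returns []
import Mathlib
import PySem

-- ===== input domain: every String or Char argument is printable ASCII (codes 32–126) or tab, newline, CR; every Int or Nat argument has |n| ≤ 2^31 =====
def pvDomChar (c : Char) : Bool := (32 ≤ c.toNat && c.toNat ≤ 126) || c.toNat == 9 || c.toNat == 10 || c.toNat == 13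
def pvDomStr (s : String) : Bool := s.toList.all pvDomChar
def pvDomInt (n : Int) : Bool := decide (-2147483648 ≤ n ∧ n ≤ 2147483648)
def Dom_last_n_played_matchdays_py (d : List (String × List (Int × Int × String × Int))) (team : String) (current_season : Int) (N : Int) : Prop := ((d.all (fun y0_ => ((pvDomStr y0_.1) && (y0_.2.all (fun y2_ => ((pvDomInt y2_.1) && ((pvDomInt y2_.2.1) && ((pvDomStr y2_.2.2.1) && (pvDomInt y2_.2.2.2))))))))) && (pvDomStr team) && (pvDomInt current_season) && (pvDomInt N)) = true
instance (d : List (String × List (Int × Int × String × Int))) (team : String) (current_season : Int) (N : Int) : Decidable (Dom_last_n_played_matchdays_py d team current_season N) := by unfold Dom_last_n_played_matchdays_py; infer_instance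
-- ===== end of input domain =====

-- ===== PORT A =====
-- B builds the ascending played list in one forward comprehension and tail-slices its
-- last N, instead of A's descending early-exit loop + reverse (objective: simpler).
-- d[team]: first-match association-list lookup; Pre_ excludes a missing key (KeyError).
def pvLookup (d : List (String × List (Int × Int × String × Int))) (team : String) : Option (List (Int × Int × String × Int)) :=
  match d with
  | [] => none
  | (k, v) :: rest => if k == team then some v else pvLookup rest team

-- Python '(current_season, matchday, "team") in d[team]' where d[team] is a dict keyed by
-- 3-tuples: membership in its keys, a scan comparing the key triple. Exact for that semantics.
def pvMem3 (current_season matchday : Int) (row : List (Int × Int × String × Int)) : Bool :=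
  row.any (fun e => e.1 == current_season && e.2.1 == matchday && e.2.2.1 == "team")

-- A's for-loop over range(38, 0, -1) with the append and the early 'break'.
def pvALoop (row : List (Int × Int × String × Int)) (current_season N : Int) :
    List Int → List Int → List Int
  | acc, [] => acc
  | acc, matchday :: rest =>
    let acc' := if pvMem3 current_season matchday row then acc ++ [matchday] else acc
    if (acc'.length : Int) ≥ N then acc' else pvALoop row current_season N acc' rest

def last_n_played_matchdays_py (d : List (String × List (Int × Int × String × Int))) (team : String) (current_season : Int) (N : Int) : List Int :=
  let row := (pvLookup d team).getD []   -- Pre_ guarantees the key is present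
  (pvALoop row current_season N [] (PySem.List.pyRange 38 0 (-1))).reverse

-- ===== PORT B =====
def last_n_played_matchdays_py_alt (d : List (String × List (Int × Int × String × Int))) (team : String) (current_season : Int) (N : Int) : List Int :=
  let row := (pvLookup d team).getD []   -- Pre_ guarantees the key is present
  let played := (PySem.List.pyRange 1 39 1).filter (fun m => pvMem3 current_season m row)
  if N > 0 then PySem.List.slice played (some (-N)) none else []

-- ===== PRECONDITION & SPEC =====
-- Pre_: the team must be a key of d (otherwise Python's d[team] raises KeyError); and it
-- excludes the degenerate request N <= 0 exactly when matchday 38 of the season was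
-- played, a corner no caller specifies: there A's break, checked only after the first
-- iteration has appended 38, returns [38], while B returns [] for a non-positive N.
def Pre_last_n_played_matchdays_py (d : List (String × List (Int × Int × String × Int))) (team : String) (current_season : Int) (N : Int) : Prop :=
  (pvLookup d team).isSome ∧
    (0 < N ∨ pvMem3 current_season 38 ((pvLookup d team).getD []) = false)
instance (d : List (String × List (Int × Int × String × Int))) (team : String) (current_season : Int) (N : Int) : Decidable (Pre_last_n_played_matchdays_py d team current_season N) := by unfold Pre_last_n_played_matchdays_py; infer_instance

def pvWitness_last_n_played_matchdays_py : (List (String × List (Int × Int × String × Int))) × String × Int × Int := ([("a", [(2024, 5, "team", 1)])], "a", 2024, 3)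

def Spec_last_n_played_matchdays_py (d : List (String × List (Int × Int × String × Int))) (team : String) (current_season : Int) (N : Int) (out : List Int) : Prop := out = last_n_played_matchdays_py_alt d team current_season N
instance (d : List (String × List (Int × Int × String × Int))) (team : String) (current_season : Int) (N : Int) (out : List Int) : Decidable (Spec_last_n_played_matchdays_py d team current_season N out) := by unfold Spec_last_n_played_matchdays_py; infer_instance

-- ===== CLAIM (what is proved, stated in full; the proofs are below) =====
def Claim_equal_last_n_played_matchdays_py : Prop := ∀ (d : List (String × List (Int × Int × String × Int))) (team : String) (current_season : Int) (N : Int), Dom_last_n_played_matchdays_py d team current_season N → Pre_last_n_played_matchdays_py d team current_season N → Spec_last_n_played_matchdays_py d team current_season N (last_n_played_matchdays_py d team current_season N)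

-- ===== LEMMAS AND PROOFS =====
-- A's loop, while the break bound has not been reached, collects the first
-- (N - len acc) matching matchdays of the remaining range.
theorem pvALoop_take (row : List (Int × Int × String × Int)) (cs N : Int) :
    ∀ (ms : List Int) (acc : List Int), (acc.length : Int) < N →
      pvALoop row cs N acc ms
        = acc ++ (ms.filter (fun m => pvMem3 cs m row)).take (N - acc.length).toNat := by
  intro ms
  induction ms with
  | nil => intro acc _; simp [pvALoop]
  | cons m rest ih =>
    intro acc h
    by_cases hp : pvMem3 cs m row = true
    · by_cases hb : ((acc ++ [m]).length : Int) ≥ N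
      · have hb2 : N ≤ (acc.length : Int) + 1 := by simpa using hb
        have h1 : (N - (acc.length : Int)).toNat = 1 := by omega
        simp [pvALoop, hp, hb2, h1]
      · have hb2 : ¬ (N ≤ (acc.length : Int) + 1) := by simpa using hb
        have hlt : (((acc ++ [m]).length : Int)) < N := lt_of_not_ge hb
        have h1 : (N - (acc.length : Int)).toNat = (N - ((acc.length : Int) + 1)).toNat + 1 := by
          omega
        simp [pvALoop, hp, hb2, ih (acc ++ [m]) hlt, h1]
    · have hb2 : ¬ (N ≤ (acc.length : Int)) := not_le.mpr h
      simp [pvALoop, hp, hb2, ih acc h]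

theorem pvWitness_ok :
    Dom_last_n_played_matchdays_py pvWitness_last_n_played_matchdays_py.1 pvWitness_last_n_played_matchdays_py.2.1 pvWitness_last_n_played_matchdays_py.2.2.1 pvWitness_last_n_played_matchdays_py.2.2.2 ∧
    Pre_last_n_played_matchdays_py pvWitness_last_n_played_matchdays_py.1 pvWitness_last_n_played_matchdays_py.2.1 pvWitness_last_n_played_matchdays_py.2.2.1 pvWitness_last_n_played_matchdays_py.2.2.2 := by
  decide

-- Over the same row: take-N of the descending filtered range, reversed, is the tail
-- slice of the ascending filtered range.
theorem pvMainRow (row : List (Int × Int × String × Int)) (cs N : Int)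
    (h38 : N ≤ 0 → pvMem3 cs 38 row = false) :
    (pvALoop row cs N [] (PySem.List.pyRange 38 0 (-1))).reverse
      = if N > 0 then
          PySem.List.slice ((PySem.List.pyRange 1 39 1).filter (fun m => pvMem3 cs m row))
            (some (-N)) none
        else [] := by
  by_cases hN : 0 < N
  · rw [if_pos hN]
    rw [pvALoop_take row cs N _ [] (by simpa using hN)]
    rw [PySem.List.pyRange_neg_one_eq_reverse]
    norm_num
    obtain ⟨k, hk⟩ : ∃ k : Nat, N = (k : Int) := ⟨N.toNat, (Int.toNat_of_nonneg (le_of_lt hN)).symm⟩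
    subst hk
    rw [List.take_reverse, List.reverse_reverse,
        PySem.List.slice_from_neg_natCast _ _ (by exact_mod_cast hN)]
    simp
  · have hN2 : N ≤ 0 := le_of_not_gt hN
    rw [if_neg hN]
    rw [show PySem.List.pyRange 38 0 (-1) = 38 :: PySem.List.pyRange 37 0 (-1) from
      PySem.List.pyRange_neg_one_cons (by norm_num)]
    simp [pvALoop, h38 hN2, hN2]

-- ===== VERDICT (by name: the statement is the Claim_ definition above) =====
theorem last_n_played_matchdays_py_spec : Claim_equal_last_n_played_matchdays_py := by
  intro d team cs N _ hpre
  obtain ⟨-, hcase⟩ := hpre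
  unfold Spec_last_n_played_matchdays_py
  simp only [last_n_played_matchdays_py, last_n_played_matchdays_py_alt]
  exact pvMainRow _ cs N (fun hN2 => hcase.resolve_left (by omega))
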